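-- pv_equiv track=rewrite | github.com/albanrutz/A03-AE2224 | scoring.py | build_colour_index
-- ===== SOURCE A (Python) =====
-- def build_colour_index(colour_map, merge_cars=False):
--     """
--     Build a lookup from RGB tuple -> category index.
--     Also returns the ordered list of category names.
--
--     If merge_cars=True, both "Static Car" and "Moving Car" map to the
--     same index and the merged category is labelled "Car".
--     """
--     if merge_cars:
--         # Build a collapsed category list with "Car" in place of both car types
--         merged_categories = []
--         seen_car = False
--         for name in colour_map:
--             if name in ("Static Car", "Moving Car"):
--                 if not seen_car:
--                     merged_categories.append("Car")
--                     seen_car = True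
--             else:
--                 merged_categories.append(name)
--
--         # Assign indices based on merged list
--         car_idx = merged_categories.index("Car")
--         colour_to_idx = {}
--         name_to_idx = {name: idx for idx, name in enumerate(merged_categories)}
--
--         for name, rgb in colour_map.items():
--             if name in ("Static Car", "Moving Car"):
--                 colour_to_idx[rgb] = car_idx
--             else:
--                 colour_to_idx[rgb] = name_to_idx[name]
--
--         return merged_categories, colour_to_idx
--     else:
--         categories = list(colour_map.keys())
--         colour_to_idx = {rgb: idx for idx, (_, rgb) in enumerate(colour_map.items())}
--         return categories, colour_to_idx
-- ===== SOURCE B (Python) =====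
-- def build_colour_index(colour_map, merge_cars=False):
--     """Single pass over colour_map.items(): build the category list and the
--     rgb->index dict together, tracking the merged-Car index on the fly."""
--     categories = []
--     colour_to_idx = {}
--     car_idx = None
--     for name, rgb in colour_map.items():
--         if merge_cars and name in ("Static Car", "Moving Car"):
--             if car_idx is None:
--                 car_idx = len(categories)
--                 categories.append("Car")
--             colour_to_idx[rgb] = car_idx
--         else:
--             colour_to_idx[rgb] = len(categories)
--             categories.append(name)
--     return categories, colour_to_idx
-- ===== Notes on version B (the rewrite author's own statement) =====
-- stated objective: simpler
-- what changed: B replaces A's two-phase merge path (build merged category list, compute car_idx via list.index and a name->idx dict, then a second scan assigning indices) and A's separate non-merge branch by ONE pass over colour_map.items() that grows the category list, the rgb->index dict and the merged-Car index together. Pre_ excludes merge_cars inputs without a car key (A raises ValueError) and merge_cars inputs whose dict already has the literal key 'Car' (both programs then emit a duplicate 'Car' label and either index assignment for it is accidental); …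
-- crash fix: When merge_cars is true and neither 'Static Car' nor 'Moving Car' is a key, A raises ValueError at merged_categories.index('Car'); B returns the plain (categories, rgb->index) mapping with no merged category. — e.g. on build_colour_index([("Tree", [7, 8, 9])], true): A raises ValueError, B returns (["Tree"], [([7, 8, 9], 0)])
import Mathlib
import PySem

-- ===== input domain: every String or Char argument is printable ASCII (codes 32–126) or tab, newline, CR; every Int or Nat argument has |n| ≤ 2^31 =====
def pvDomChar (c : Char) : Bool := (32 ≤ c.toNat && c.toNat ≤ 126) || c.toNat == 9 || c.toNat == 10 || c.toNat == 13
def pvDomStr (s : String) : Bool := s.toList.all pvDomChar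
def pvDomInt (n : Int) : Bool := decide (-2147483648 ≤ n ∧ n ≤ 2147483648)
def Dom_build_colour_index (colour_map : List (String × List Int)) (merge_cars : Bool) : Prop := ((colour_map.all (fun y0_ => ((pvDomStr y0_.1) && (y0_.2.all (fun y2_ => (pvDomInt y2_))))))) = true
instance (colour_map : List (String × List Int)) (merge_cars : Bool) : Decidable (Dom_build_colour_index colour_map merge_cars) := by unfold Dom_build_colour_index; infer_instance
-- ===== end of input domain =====

-- B is a single pass that builds the category list and the rgb→index dict together
-- (objective: simpler); A uses a merged-list prescan plus a second indexing scan.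

-- ===== PORT A =====
def pvIsCar (s : String) : Bool := s == "Static Car" || s == "Moving Car"

def pvMergeStep (st : List String × Bool) (p : String × List Int) : List String × Bool :=
  if pvIsCar p.1 then (if st.2 then st else (st.1 ++ ["Car"], true)) else (st.1 ++ [p.1], st.2)

def build_colour_index (colour_map : List (String × List Int)) (merge_cars : Bool) :
    List String × (List (List Int × Int)) :=
  if merge_cars then
    let merged := (colour_map.foldl pvMergeStep ([], false)).1
    -- merged_categories.index("Car"): ValueError (= none) when no car key; excluded by Pre_
    let car_idx : Int := ((PySem.List.index? merged "Car").getD 0 : Nat)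
    let name_to_idx : PySem.Dict String Int :=
      (PySem.List.enumerate merged 0).foldl (fun d q => d.insert q.2 q.1) PySem.Dict.empty
    -- name_to_idx[name]: every non-car name is a key of name_to_idx, so getD is exact here
    let colour_to_idx : PySem.Dict (List Int) Int :=
      colour_map.foldl (fun d p =>
        if pvIsCar p.1 then d.insert p.2 car_idx
        else d.insert p.2 (name_to_idx.getD p.1 0)) PySem.Dict.empty
    (merged, colour_to_idx.items)
  else
    (colour_map.map (·.1),
     ((PySem.List.enumerate colour_map 0).foldl
        (fun d q => d.insert q.2.2 q.1) PySem.Dict.empty).items)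

-- ===== PORT B =====
def pvAltStep (merge_cars : Bool) (st : List String × PySem.Dict (List Int) Int × Option Int)
    (p : String × List Int) : List String × PySem.Dict (List Int) Int × Option Int :=
  if merge_cars && pvIsCar p.1 then
    match st.2.2 with
    | none => (st.1 ++ ["Car"], st.2.1.insert p.2 (st.1.length : Int), some (st.1.length : Int))
    | some ci => (st.1, st.2.1.insert p.2 ci, some ci)
  else (st.1 ++ [p.1], st.2.1.insert p.2 (st.1.length : Int), st.2.2)

def build_colour_index_alt (colour_map : List (String × List Int)) (merge_cars : Bool) :
    List String × (List (List Int × Int)) :=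
  let st := colour_map.foldl (pvAltStep merge_cars) ([], PySem.Dict.empty, none)
  (st.1, st.2.1.items)

-- ===== PRECONDITION & SPEC =====
-- Pre_ excludes merge_cars inputs without a car key (A raises ValueError), merge_cars inputs whose
-- dict already has the literal key "Car" (both programs then emit a duplicate "Car" label and either
-- index assignment for it is accidental), and association lists with duplicate keys (unreachable
-- from a Python dict, whose keys are unique).
def Pre_build_colour_index (colour_map : List (String × List Int)) (merge_cars : Bool) : Prop :=
  (colour_map.map (·.1)).Nodup ∧
  (merge_cars = true →
    "Car" ∉ colour_map.map (·.1) ∧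
    ("Static Car" ∈ colour_map.map (·.1) ∨ "Moving Car" ∈ colour_map.map (·.1)))
instance (colour_map : List (String × List Int)) (merge_cars : Bool) :
    Decidable (Pre_build_colour_index colour_map merge_cars) := by
  unfold Pre_build_colour_index; infer_instance

def pvWitness_build_colour_index : (List (String × List Int)) × Bool :=
  ([("Static Car", [1, 2, 3]), ("Tree", [4, 5, 6])], true)

-- When merge_cars is true and neither "Static Car" nor "Moving Car" is a key, A raises ValueError
-- at merged_categories.index("Car"); B returns the plain (categories, rgb→index) mapping.
def Raises_build_colour_index (colour_map : List (String × List Int)) (merge_cars : Bool) : Prop :=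
  merge_cars = true ∧
  "Static Car" ∉ colour_map.map (·.1) ∧ "Moving Car" ∉ colour_map.map (·.1)
instance (colour_map : List (String × List Int)) (merge_cars : Bool) :
    Decidable (Raises_build_colour_index colour_map merge_cars) := by
  unfold Raises_build_colour_index; infer_instance

def pvRaiseWitness_build_colour_index : (List (String × List Int)) × Bool :=
  ([("Tree", [7, 8, 9])], true)
def pvRaiseWitnessOut_build_colour_index : List String × (List (List Int × Int)) :=
  (["Tree"], [([7, 8, 9], 0)])

def Spec_build_colour_index (colour_map : List (String × List Int)) (merge_cars : Bool)
    (out : List String × (List (List Int × Int))) : Prop :=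
  out = build_colour_index_alt colour_map merge_cars
instance (colour_map : List (String × List Int)) (merge_cars : Bool)
    (out : List String × (List (List Int × Int))) :
    Decidable (Spec_build_colour_index colour_map merge_cars out) := by
  unfold Spec_build_colour_index; infer_instance

-- ===== CLAIM (what is proved, stated in full; the proofs are below) =====
def Claim_equal_build_colour_index : Prop :=
  ∀ (colour_map : List (String × List Int)) (merge_cars : Bool),
    Dom_build_colour_index colour_map merge_cars →
    Pre_build_colour_index colour_map merge_cars →
    Spec_build_colour_index colour_map merge_cars (build_colour_index colour_map merge_cars)

-- (Claim_equal_build_colour_index is discharged below as build_colour_index_spec,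
--  Claim_raises_build_colour_index as build_colour_index_raises.)
def Claim_raises_build_colour_index : Prop :=
  (∀ (colour_map : List (String × List Int)) (merge_cars : Bool),
      Dom_build_colour_index colour_map merge_cars →
      Raises_build_colour_index colour_map merge_cars →
      ¬ Pre_build_colour_index colour_map merge_cars) ∧
  (Dom_build_colour_index (pvRaiseWitness_build_colour_index.1) (pvRaiseWitness_build_colour_index.2) ∧
   Raises_build_colour_index (pvRaiseWitness_build_colour_index.1) (pvRaiseWitness_build_colour_index.2) ∧
   build_colour_index_alt (pvRaiseWitness_build_colour_index.1) (pvRaiseWitness_build_colour_index.2)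
     = pvRaiseWitnessOut_build_colour_index)

-- ===== LEMMAS AND PROOFS =====

-- the tail of A's merged category list contributed by the unprocessed suffix, given the seen_car flag
def pvMTail (seen : Bool) : List (String × List Int) → List String
  | [] => []
  | p :: t => if pvIsCar p.1 then (if seen then pvMTail true t else "Car" :: pvMTail true t)
              else p.1 :: pvMTail seen t

-- number of merged categories contributed strictly before the first entry named `name`
def pvMBefore (seen : Bool) (name : String) : List (String × List Int) → Nat
  | [] => 0
  | p :: t => if p.1 = name then 0
      else if pvIsCar p.1 then (if seen then pvMBefore true name t else 1 + pvMBefore true name t)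
      else 1 + pvMBefore seen name t

-- number of merged categories contributed strictly before the first car entry
def pvNcBefore : List (String × List Int) → Nat
  | [] => 0
  | p :: t => if pvIsCar p.1 then 0 else 1 + pvNcBefore t

theorem pvMergeFold (l : List (String × List Int)) :
    ∀ (cats : List String) (seen : Bool),
      l.foldl pvMergeStep (cats, seen) = (cats ++ pvMTail seen l, seen || l.any (pvIsCar ·.1)) := by
  induction l with
  | nil => intro cats seen; simp [pvMTail]
  | cons q t ih =>
    intro cats seen
    by_cases hq : pvIsCar q.1 = true
    · cases seen with
      | false => simp [pvMergeStep, pvMTail, hq, ih]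
      | true => simp [pvMergeStep, pvMTail, hq, ih]
    · simp [pvMergeStep, pvMTail, hq, ih, List.append_assoc]

theorem pvMTail_mem (l : List (String × List Int)) :
    ∀ (seen : Bool) (x : String), x ∈ pvMTail seen l → x = "Car" ∨ x ∈ l.map (·.1) := by
  induction l with
  | nil => intro seen x hx; simp [pvMTail] at hx
  | cons q t ih =>
    intro seen x hx
    have step : x ∈ pvMTail true t ∨ x ∈ pvMTail seen t ∨ x = "Car" ∨ x = q.1 := by
      by_cases hq : pvIsCar q.1 = true
      · cases seen with
        | true => simp only [pvMTail, hq, if_true] at hx; exact Or.inl hx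
        | false =>
          simp only [pvMTail, hq, if_true, Bool.false_eq_true, if_false, List.mem_cons] at hx
          rcases hx with h | h
          · exact Or.inr (Or.inr (Or.inl h))
          · exact Or.inl h
      · simp only [pvMTail, if_neg hq, List.mem_cons] at hx
        rcases hx with h | h
        · exact Or.inr (Or.inr (Or.inr h))
        · exact Or.inr (Or.inl h)
    rcases step with h | h | h | h
    · rcases ih true x h with h' | h'
      · exact Or.inl h'
      · exact Or.inr (by simp [h'])
    · rcases ih seen x h with h' | h'
      · exact Or.inl h'
      · exact Or.inr (by simp [h'])
    · exact Or.inl h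
    · exact Or.inr (by simp [h])

theorem pvIndexCar (l : List (String × List Int)) :
    "Car" ∉ l.map (·.1) → (∃ p ∈ l, pvIsCar p.1 = true) →
    PySem.List.index? (pvMTail false l) "Car" = some (pvNcBefore l) := by
  induction l with
  | nil => intro _ h; simp at h
  | cons q t ih =>
    intro hno hex
    by_cases hq : pvIsCar q.1 = true
    · simp only [pvMTail, pvNcBefore, hq, if_true, if_false]
      exact PySem.List.index?_cons_self _ _
    · have hqne : q.1 ≠ "Car" := by
        intro h; exact hno (by simp [h])
      have hex' : ∃ p ∈ t, pvIsCar p.1 = true := by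
        rcases hex with ⟨p, hp, hcar⟩
        rcases List.mem_cons.mp hp with rfl | hp'
        · exact absurd hcar hq
        · exact ⟨p, hp', hcar⟩
      have hno' : "Car" ∉ t.map (·.1) := fun h => hno (by simp [h])
      simp only [pvMTail, pvNcBefore, if_neg hq]
      rw [PySem.List.index?_cons_of_ne _ hqne, ih hno' hex']
      simp [Nat.add_comm]


theorem pvEnumFold_not_mem (M : List String) :
    ∀ (s : Int) (d : PySem.Dict String Int) (name : String), name ∉ M →
      ((PySem.List.enumerate M s).foldl (fun d q => d.insert q.2 q.1) d).getD name 0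
        = d.getD name 0 := by
  induction M with
  | nil => intro s d name _; simp [PySem.List.enumerate]
  | cons x t ih =>
    intro s d name hn
    have hne : name ≠ x := fun h => hn (by simp [h])
    rw [PySem.List.enumerate_cons]
    simp only [List.foldl_cons]
    rw [ih (s + 1) _ name (fun h => hn (List.mem_cons_of_mem _ h))]
    rw [PySem.Dict.getD_insert]
    simp [hne]

theorem pvEnumFold_unique (u v : List String) (name : String) (hu : name ∉ u) (hv : name ∉ v)
    (s : Int) (d : PySem.Dict String Int) :
    ((PySem.List.enumerate (u ++ name :: v) s).foldl (fun d q => d.insert q.2 q.1) d).getD name 0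
      = s + u.length := by
  rw [PySem.List.enumerate_append, List.foldl_append, PySem.List.enumerate_cons]
  simp only [List.foldl_cons]
  rw [pvEnumFold_not_mem v _ _ name hv, PySem.Dict.getD_insert]
  simp

theorem pvDecomp (l : List (String × List Int)) :
    ∀ (seen : Bool) (name : String), name ∈ l.map (·.1) → pvIsCar name = false →
      name ≠ "Car" → (l.map (·.1)).Nodup →
      ∃ u v, pvMTail seen l = u ++ name :: v ∧ u.length = pvMBefore seen name l ∧
        name ∉ u ∧ name ∉ v := by
  induction l with
  | nil => intro seen name h; simp at h
  | cons q t ih =>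
    intro seen name hmem hnc hne hnd
    have hnd' : (t.map (·.1)).Nodup := (List.nodup_cons.mp (by rw [List.map_cons] at hnd; exact hnd)).2
    by_cases hqn : q.1 = name
    · have hq : pvIsCar q.1 = false := by rw [hqn]; exact hnc
      have hnotin : name ∉ t.map (·.1) := by
        have := (List.nodup_cons.mp (by rw [List.map_cons] at hnd; exact hnd)).1
        rwa [hqn] at this
      refine ⟨[], pvMTail seen t, ?_, ?_, by simp, ?_⟩
      · simp [pvMTail, hq, hqn, hnc]
      · simp [pvMBefore, hqn]
      · intro hx
        rcases pvMTail_mem t seen name hx with h | h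
        · exact hne h
        · exact hnotin h
    · have hmem' : name ∈ t.map (·.1) := by
        rcases List.mem_map.mp hmem with ⟨p, hp, hpe⟩
        rcases List.mem_cons.mp hp with rfl | hp'
        · exact absurd hpe hqn
        · exact List.mem_map.mpr ⟨p, hp', hpe⟩
      by_cases hq : pvIsCar q.1 = true
      · cases seen with
        | false =>
          obtain ⟨u, v, he, hl, hu, hv⟩ := ih true name hmem' hnc hne hnd'
          refine ⟨"Car" :: u, v, ?_, ?_, ?_, hv⟩
          · simp [pvMTail, hq, he]
          · simp [pvMBefore, hqn, hq]
            omega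
          · intro hx
            rcases List.mem_cons.mp hx with h | h
            · exact hne h
            · exact hu h
        | true =>
          obtain ⟨u, v, he, hl, hu, hv⟩ := ih true name hmem' hnc hne hnd'
          refine ⟨u, v, ?_, ?_, hu, hv⟩
          · simp [pvMTail, hq, he]
          · simp only [pvMBefore]
            simp [hqn, hq]
            exact hl
      · obtain ⟨u, v, he, hl, hu, hv⟩ := ih seen name hmem' hnc hne hnd'
        refine ⟨q.1 :: u, v, ?_, ?_, ?_, hv⟩
        · simp [pvMTail, if_neg hq, he]
        · simp [pvMBefore, hqn, if_neg hq]
          omega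
        · intro hx
          rcases List.mem_cons.mp hx with h | h
          · exact hqn h.symm
          · exact hu h

theorem pvCarNe {a b : String} (ha : pvIsCar a = true) (hb : pvIsCar b = false) : a ≠ b := by
  intro h; rw [h, hb] at ha; exact Bool.false_ne_true ha

theorem pvAltTrue (nidx : PySem.Dict String Int) (ci : Int) (l : List (String × List Int)) :
    ∀ (cats : List String) (d : PySem.Dict (List Int) Int) (car : Option Int),
      (l.map (·.1)).Nodup →
      (∀ p ∈ l, pvIsCar p.1 = false →
        nidx.getD p.1 0 = (cats.length : Int) + (pvMBefore car.isSome p.1 l : Int)) →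
      (∀ c, car = some c → c = ci) →
      (car = none → (∃ p ∈ l, pvIsCar p.1 = true) →
        ci = (cats.length : Int) + (pvNcBefore l : Int)) →
      (l.foldl (pvAltStep true) (cats, d, car)).1 = cats ++ pvMTail car.isSome l ∧
      (l.foldl (pvAltStep true) (cats, d, car)).2.1 =
        l.foldl (fun d p => if pvIsCar p.1 then d.insert p.2 ci
                            else d.insert p.2 (nidx.getD p.1 0)) d := by
  induction l with
  | nil => intro cats d car _ _ _ _; simp [pvMTail]
  | cons q t ih =>
    intro cats d car hnd hval hcarS hcarN
    have hnd' : (t.map (·.1)).Nodup := (List.nodup_cons.mp (by rw [List.map_cons] at hnd; exact hnd)).2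
    have hq1 : q.1 ∉ t.map (·.1) := (List.nodup_cons.mp (by rw [List.map_cons] at hnd; exact hnd)).1
    by_cases hq : pvIsCar q.1 = true
    · cases car with
      | none =>
        have hci : ci = (cats.length : Int) := by
          have h := hcarN rfl ⟨q, by simp, hq⟩
          simp only [pvNcBefore, hq, if_true] at h
          omega
        have hstep : pvAltStep true (cats, d, none) q
            = (cats ++ ["Car"], d.insert q.2 ci, some ci) := by
          simp [pvAltStep, hq, hci]
        have ihh := ih (cats ++ ["Car"]) (d.insert q.2 ci) (some ci) hnd'
          (by
            intro p hp hnc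
            have h := hval p (List.mem_cons_of_mem _ hp) hnc
            simp only [Option.isSome_none] at h
            simp only [pvMBefore, (pvCarNe hq hnc), if_false, hq, if_true,
              Bool.false_eq_true] at h
            simp only [Option.isSome_some, List.length_append, List.length_singleton]
            push_cast at h ⊢
            omega)
          (by intro c hc; injection hc with hc; exact hc.symm)
          (by intro h; exact absurd h (by simp))
        simp only [List.foldl_cons, hstep]
        simp only [Option.isSome_some] at ihh
        simp only [Option.isSome_none]
        have hmt : pvMTail false (q :: t) = "Car" :: pvMTail true t := by
          simp [pvMTail, hq]
        rw [hmt]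
        refine ⟨?_, ?_⟩
        · rw [ihh.1]; simp
        · rw [ihh.2]; simp [hq]
      | some c =>
        have hc : c = ci := hcarS c rfl
        have hstep : pvAltStep true (cats, d, some c) q
            = (cats, d.insert q.2 ci, some ci) := by
          simp [pvAltStep, hq, hc]
        have ihh := ih cats (d.insert q.2 ci) (some ci) hnd'
          (by
            intro p hp hnc
            have h := hval p (List.mem_cons_of_mem _ hp) hnc
            simp only [Option.isSome_some] at h ⊢
            simp only [pvMBefore, (pvCarNe hq hnc), if_false, hq, if_true] at h
            exact h)
          (by intro c' hc'; injection hc' with hc'; exact hc'.symm)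
          (by intro h; exact absurd h (by simp))
        simp only [List.foldl_cons, hstep]
        simp only [Option.isSome_some] at ihh ⊢
        have hmt : pvMTail true (q :: t) = pvMTail true t := by simp [pvMTail, hq]
        rw [hmt]
        refine ⟨ihh.1, ?_⟩
        · rw [ihh.2]; simp [hq]
    · have hgd : nidx.getD q.1 0 = (cats.length : Int) := by
        have h := hval q (by simp) (by simpa using hq)
        simp [pvMBefore] at h
        omega
      have hstep : pvAltStep true (cats, d, car) q
          = (cats ++ [q.1], d.insert q.2 (nidx.getD q.1 0), car) := by
        simp [pvAltStep, hq, hgd]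
      have ihh := ih (cats ++ [q.1]) (d.insert q.2 (nidx.getD q.1 0)) car hnd'
        (by
          intro p hp hnc
          have h := hval p (List.mem_cons_of_mem _ hp) hnc
          have hne : q.1 ≠ p.1 := by
            intro he; exact hq1 (he ▸ List.mem_map.mpr ⟨p, hp, rfl⟩)
          simp only [pvMBefore, hne, if_false, if_neg hq, List.length_append,
            List.length_singleton] at h ⊢
          push_cast at h ⊢
          omega)
        hcarS
        (by
          intro hn hex
          have h := hcarN hn ⟨hex.choose, List.mem_cons_of_mem _ hex.choose_spec.1,
            hex.choose_spec.2⟩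
          simp only [pvNcBefore, if_neg hq, List.length_append, List.length_singleton] at h ⊢
          push_cast at h ⊢
          omega)
      simp only [List.foldl_cons, hstep]
      have hmt : ∀ s, pvMTail s (q :: t) = q.1 :: pvMTail s t := by
        intro s; simp [pvMTail, if_neg hq]
      rw [hmt]
      refine ⟨?_, ?_⟩
      · rw [ihh.1]; simp
      · rw [ihh.2]; simp [hq]

theorem pvAltFalse (l : List (String × List Int)) :
    ∀ (cats : List String) (d : PySem.Dict (List Int) Int) (car : Option Int),
      l.foldl (pvAltStep false) (cats, d, car)
        = (cats ++ l.map (·.1),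
           (PySem.List.enumerate l (cats.length : Int)).foldl
             (fun d q => d.insert q.2.2 q.1) d,
           car) := by
  induction l with
  | nil => intro cats d car; simp [PySem.List.enumerate]
  | cons q t ih =>
    intro cats d car
    have hstep : pvAltStep false (cats, d, car) q
        = (cats ++ [q.1], d.insert q.2 (cats.length : Int), car) := by
      simp [pvAltStep]
    rw [PySem.List.enumerate_cons]
    simp only [List.foldl_cons, hstep, ih]
    have : ((cats ++ [q.1]).length : Int) = (cats.length : Int) + 1 := by
      simp
    rw [this]
    simp

-- ===== VERDICT (by name: the statement is the Claim_ definition above) =====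
theorem build_colour_index_spec : Claim_equal_build_colour_index := by
  intro cm mc hdom hpre
  unfold Spec_build_colour_index
  cases mc with
  | false =>
    have hB := pvAltFalse cm [] PySem.Dict.empty none
    simp only [build_colour_index, build_colour_index_alt, Bool.false_eq_true, if_false, hB]
    simp
  | true =>
    obtain ⟨hnd, h2⟩ := hpre
    obtain ⟨hnocar, hor⟩ := h2 rfl
    have hex : ∃ p ∈ cm, pvIsCar p.1 = true := by
      rcases hor with h | h <;>
      · rcases List.mem_map.mp h with ⟨p, hp, hpe⟩
        exact ⟨p, hp, by simp [pvIsCar, hpe]⟩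
    have hidx : PySem.List.index? (pvMTail false cm) "Car" = some (pvNcBefore cm) :=
      pvIndexCar cm hnocar hex
    have hval : ∀ p ∈ cm, pvIsCar p.1 = false →
        ((PySem.List.enumerate (pvMTail false cm) 0).foldl (fun d q => d.insert q.2 q.1)
          PySem.Dict.empty).getD p.1 0
          = ((List.length ([] : List String) : Int))
              + (pvMBefore (Option.isSome (none : Option Int)) p.1 cm : Int) := by
      intro p hp hnc
      have hpm : p.1 ∈ cm.map (·.1) := List.mem_map.mpr ⟨p, hp, rfl⟩
      have hpne : p.1 ≠ "Car" := fun h => hnocar (h ▸ hpm)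
      obtain ⟨u, v, he, hl, hu, hv⟩ := pvDecomp cm false p.1 hpm hnc hpne hnd
      rw [he, pvEnumFold_unique u v p.1 hu hv 0 PySem.Dict.empty, hl]
      simp
    have main := pvAltTrue
      ((PySem.List.enumerate (pvMTail false cm) 0).foldl (fun d q => d.insert q.2 q.1)
        PySem.Dict.empty)
      ((pvNcBefore cm : Nat) : Int) cm [] PySem.Dict.empty none hnd hval
      (by intro c hc; cases hc)
      (by intro _ _; simp)
    simp only [Option.isSome_none] at main
    simp only [build_colour_index, build_colour_index_alt]
    rw [pvMergeFold cm [] false]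
    simp only [List.nil_append, Bool.false_eq_true, if_false, hidx, Option.getD_some,
      if_true]
    rw [main.1, main.2]
    simp

theorem build_colour_index_raises : Claim_raises_build_colour_index := by
  unfold Claim_raises_build_colour_index
  constructor
  · rintro cm mc hdom ⟨hmc, hs, hm⟩ ⟨hnd, h2⟩
    obtain ⟨_, hor⟩ := h2 hmc
    rcases hor with h | h
    · exact hs h
    · exact hm h
  · decide

-- self-check: the raise witness indeed lies outside Pre_ (uses build_colour_index_raises)
theorem build_colour_index_raises_ok :
    ¬ Pre_build_colour_index pvRaiseWitness_build_colour_index.1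
        pvRaiseWitness_build_colour_index.2 := by
  have h := build_colour_index_raises
  unfold Claim_raises_build_colour_index at h
  exact h.1 _ _ h.2.1 h.2.2.1
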